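-- pv_equiv track=rewrite | github.com/yeah1tnt/python-p3-cartoon-collections-lab | lib/cartoon_collections.py | long_planeteer_calls
-- ===== SOURCE A (Python) =====
-- def long_planeteer_calls(arr):
--     count = 0
--     for i in arr:
--         if(len(i) <= 4):
--             count += 1
--         else:
--             count += 0
--     if count == len(arr):
--         return False
--     else:
--         return True
-- ===== SOURCE B (Python) =====
-- def long_planeteer_calls(arr):
--     for i in arr:
--         if len(i) > 4:
--             return True
--     return False
-- ===== Notes on version B (the rewrite author's own statement) =====
-- stated objective: simpler
-- what changed: Replaces the count-short-strings-then-compare-to-length scheme with a direct short-circuiting existence check that returns True at the first element longer than 4, with no counter.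
import Mathlib
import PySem

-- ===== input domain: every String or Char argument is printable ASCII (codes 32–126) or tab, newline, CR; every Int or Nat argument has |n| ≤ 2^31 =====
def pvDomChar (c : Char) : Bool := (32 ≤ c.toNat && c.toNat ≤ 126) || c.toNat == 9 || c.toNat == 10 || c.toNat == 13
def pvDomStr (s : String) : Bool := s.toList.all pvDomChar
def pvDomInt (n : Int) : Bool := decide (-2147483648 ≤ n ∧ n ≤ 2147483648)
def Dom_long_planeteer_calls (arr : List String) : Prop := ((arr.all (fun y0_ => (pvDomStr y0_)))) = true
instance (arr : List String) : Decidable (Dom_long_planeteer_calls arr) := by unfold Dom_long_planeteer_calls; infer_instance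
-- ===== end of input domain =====

-- ===== PORT A =====
-- B replaces A's count-all-short-strings-and-compare scheme with a short-circuiting existence check (simpler).
-- loop of B: return True at the first element with len > 4, else False at the end
def longRec : List String → Bool
  | [] => false
  | i :: rest => if PySem.Str.len i > 4 then true else longRec rest

def long_planeteer_calls (arr : List String) : Bool :=
  let count := arr.foldl (fun c i => if PySem.Str.len i ≤ 4 then c + 1 else c + 0) (0 : Int)
  if count == (PySem.List.len arr) then false else true

-- ===== PORT B =====
def long_planeteer_calls_alt (arr : List String) : Bool :=
  longRec arr

-- ===== PRECONDITION & SPEC =====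
def Spec_long_planeteer_calls (arr : List String) (out : Bool) : Prop := out = long_planeteer_calls_alt arr
instance (arr : List String) (out : Bool) : Decidable (Spec_long_planeteer_calls arr out) := by unfold Spec_long_planeteer_calls; infer_instance

-- ===== CLAIM (what is proved, stated in full; the proofs are below) =====
def Claim_equal_long_planeteer_calls : Prop := ∀ (arr : List String), Dom_long_planeteer_calls arr → Spec_long_planeteer_calls arr (long_planeteer_calls arr)

-- ===== LEMMAS AND PROOFS =====

-- ===== VERDICT (by name: the statement is the Claim_ definition above) =====
lemma count_foldl (arr : List String) (c : Int) :
    arr.foldl (fun c i => if PySem.Str.len i ≤ 4 then c + 1 else c + 0) c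
      = c + (arr.countP (fun i => decide (PySem.Str.len i ≤ 4)) : Int) := by
  induction arr generalizing c with
  | nil => simp
  | cons h t ih =>
    simp only [List.foldl_cons, List.countP_cons, ih]
    by_cases hc : PySem.Str.len h ≤ 4
    · simp only [hc, decide_true, if_true]; push_cast; ring
    · simp only [hc, decide_false, if_false]; push_cast; ring

lemma longRec_eq (arr : List String) :
    longRec arr = arr.any (fun i => decide (PySem.Str.len i > 4)) := by
  induction arr with
  | nil => rfl
  | cons h t ih => simp [longRec, ih]

theorem long_planeteer_calls_spec : Claim_equal_long_planeteer_calls := by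
  intro arr _
  unfold Spec_long_planeteer_calls long_planeteer_calls long_planeteer_calls_alt
  rw [longRec_eq]
  simp only [count_foldl, zero_add, PySem.List.len, beq_iff_eq]
  have hc : List.countP (fun i => decide (PySem.Str.len i ≤ 4)) arr = arr.length ↔
      ∀ x ∈ arr, PySem.Str.len x ≤ 4 := by
    rw [List.countP_eq_length]; simp
  by_cases hall : ∀ x ∈ arr, PySem.Str.len x ≤ 4
  · rw [if_pos (by exact_mod_cast hc.mpr hall)]
    symm
    simp only [List.any_eq_false, decide_eq_true_eq]
    intro x hx
    exact not_lt.mpr (hall x hx)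
  · rw [if_neg (fun h => hall (hc.mp (by exact_mod_cast h)))]
    symm
    simp only [List.any_eq_true, decide_eq_true_eq]
    push Not at hall
    obtain ⟨x, hx, h4⟩ := hall
    exact ⟨x, hx, h4⟩
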